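-- pv_equiv track=rewrite | github.com/Mireutale/Algorithm | Programmers/Pg_42586/42586_기능개발.py | solution
-- ===== SOURCE A (Python) =====
-- from collections import deque
--
-- def solution(progresses, speeds):
--     finish = deque([0] for _ in range(len(progresses)))
--
--     # 마감일 계산
--     for i in range(len(progresses)):
--         t = 1
--         while progresses[i] + speeds[i] * t < 100:
--             t += 1
--         finish[i] = t
--
--     # 출력
--     answer = []
--     i, cnt = 0, 1
--     temp = finish.popleft()
--     while finish:
--         if temp < finish[0]:
--             answer.append(cnt)
--             cnt = 1
--             if finish:
--                 temp = finish.popleft()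
--         else:
--             finish.popleft()
--             cnt += 1
--     answer.append(cnt)
--     return answer
-- ===== SOURCE B (Python) =====
-- def solution(progresses, speeds):
--     # Closed-form finish day (done after day 1, else ceil division); single pass groups releases.
--     answer = []
--     leader = 0
--     cnt = 0
--     for p, s in zip(progresses, speeds):
--         t = 1 if p + s >= 100 else -((p - 100) // s)
--         if cnt == 0 or t > leader:
--             if cnt:
--                 answer.append(cnt)
--             leader, cnt = t, 1
--         else:
--             cnt += 1
--     if cnt:
--         answer.append(cnt)
--     return answer
-- ===== Notes on version B (the rewrite author's own statement) =====
-- stated objective: alternative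
-- what changed: B replaces A's per-feature incrementing while-loop with a closed-form finish day (1 if already done after day one, else ceil division) and fuses A's separate deque-consuming grouping pass into the same single zip loop.
import Mathlib
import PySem

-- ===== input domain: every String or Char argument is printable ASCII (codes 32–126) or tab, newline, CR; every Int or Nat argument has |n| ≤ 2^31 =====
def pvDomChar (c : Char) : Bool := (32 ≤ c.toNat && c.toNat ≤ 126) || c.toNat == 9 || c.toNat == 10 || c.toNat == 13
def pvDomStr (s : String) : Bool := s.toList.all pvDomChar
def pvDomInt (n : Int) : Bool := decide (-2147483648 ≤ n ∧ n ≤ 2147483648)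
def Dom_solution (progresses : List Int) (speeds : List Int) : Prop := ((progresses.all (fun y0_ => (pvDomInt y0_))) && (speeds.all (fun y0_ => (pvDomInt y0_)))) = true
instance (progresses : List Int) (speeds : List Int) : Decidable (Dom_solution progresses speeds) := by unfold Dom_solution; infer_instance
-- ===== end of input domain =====

-- B computes each finish day by a ceil-division closed form and groups releases in the
-- same single pass, instead of A's incrementing while-loop per feature plus a second
-- deque-consuming grouping loop.

-- ===== PORT A =====
-- A's inner `while progresses[i] + speeds[i] * t < 100: t += 1`, fuel-bounded; Pre_ makes the fuel sufficient.
def whileT (fuel : Nat) (p : Int) (s : Int) (t : Int) : Int :=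
  match fuel with
  | 0 => t
  | f + 1 => if p + s * t < 100 then whileT f p s (t + 1) else t

-- A's second loop: temp = popleft(); while finish: if temp < finish[0] … else …; append cnt.
def groupLoop (temp : Int) (finish : List Int) (cnt : Int) (answer : List Int) : List Int :=
  match finish with
  | [] => answer ++ [cnt]
  | f :: rest =>
    if temp < f then groupLoop f rest 1 (answer ++ [cnt])
    else groupLoop temp rest (cnt + 1) answer

def solution (progresses : List Int) (speeds : List Int) : List Int :=
  -- finish[i] = t from the incrementing loop; speeds[i] via getD (Python raises on a short
  -- speeds list — Pre_ requires equal lengths).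
  let finish := (List.range progresses.length).map (fun i =>
    whileT (100 - progresses.getD i 0).toNat (progresses.getD i 0) (speeds.getD i 0) 1)
  match finish with
  | [] => []  -- Python: finish.popleft() raises IndexError here; Pre_ excludes the empty list
  | f :: rest => groupLoop f rest 1 []

-- ===== PORT B =====
def ceilT (ps : Int × Int) : Int :=
  if ps.1 + ps.2 ≥ 100 then 1 else -(PySem.Int.floordiv (ps.1 - 100) ps.2)

def altStep (st : Int × Int × List Int) (ps : Int × Int) : Int × Int × List Int :=
  let t := ceilT ps
  if st.2.1 = 0 ∨ t > st.1 then (t, 1, if st.2.1 ≠ 0 then st.2.2 ++ [st.2.1] else st.2.2)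
  else (st.1, st.2.1 + 1, st.2.2)

def solution_alt (progresses : List Int) (speeds : List Int) : List Int :=
  let r := (progresses.zip speeds).foldl altStep (0, 0, [])
  if r.2.1 ≠ 0 then r.2.2 ++ [r.2.1] else r.2.2

-- ===== PRECONDITION & SPEC =====
-- Pre_ excludes exactly the inputs where A does not return: a speeds list shorter than
-- progresses and the empty progresses list (IndexError), and a feature with non-positive
-- speed still short of 100 after day one (A's incrementing loop never terminates there).
def Pre_solution (progresses : List Int) (speeds : List Int) : Prop :=
  progresses.length ≤ speeds.length ∧ progresses ≠ [] ∧
    ∀ ps ∈ progresses.zip speeds, 100 ≤ ps.1 + ps.2 ∨ 1 ≤ ps.2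
instance (progresses : List Int) (speeds : List Int) : Decidable (Pre_solution progresses speeds) := by unfold Pre_solution; infer_instance

def pvWitness_solution : List Int × List Int := ([93, 30, 55], [1, 30, 5])

def Spec_solution (progresses : List Int) (speeds : List Int) (out : List Int) : Prop := out = solution_alt progresses speeds
instance (progresses : List Int) (speeds : List Int) (out : List Int) : Decidable (Spec_solution progresses speeds out) := by unfold Spec_solution; infer_instance

-- ===== CLAIM (what is proved, stated in full; the proofs are below) =====
def Claim_equal_solution : Prop := ∀ (progresses : List Int) (speeds : List Int), Dom_solution progresses speeds → Pre_solution progresses speeds → Spec_solution progresses speeds (solution progresses speeds)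

-- ===== LEMMAS AND PROOFS =====

-- ceil ((100-p)/s) ≤ t ↔ 100 ≤ p + s*t, for 1 ≤ s
lemma ceil_le_iff (p s t : Int) (hs : 1 ≤ s) :
    -(PySem.Int.floordiv (p - 100) s) ≤ t ↔ 100 ≤ p + s * t := by
  rw [PySem.Int.floordiv_eq_ediv_of_pos (by omega)]
  rw [neg_le, Int.le_ediv_iff_mul_le (by omega)]
  constructor <;> intro h <;> nlinarith

-- whileT with sufficient fuel computes max t (ceil ((100-p)/s))
lemma whileT_spec (s : Int) (hs : 1 ≤ s) :
    ∀ (fuel : Nat) (p t : Int), 100 ≤ p + s * (t + fuel) →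
      whileT fuel p s t = max t (-(PySem.Int.floordiv (p - 100) s)) := by
  intro fuel
  induction fuel with
  | zero =>
    intro p t h
    simp only [whileT]
    have : -(PySem.Int.floordiv (p - 100) s) ≤ t := by
      rw [ceil_le_iff p s t hs]; simpa using h
    omega
  | succ f ih =>
    intro p t h
    simp only [whileT]
    by_cases hlt : p + s * t < 100
    · rw [if_pos hlt, ih p (t + 1) (by push_cast at h ⊢; nlinarith)]
      have : ¬ (-(PySem.Int.floordiv (p - 100) s) ≤ t) := by
        rw [ceil_le_iff p s t hs]; omega
      omega
    · rw [if_neg hlt]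
      have : -(PySem.Int.floordiv (p - 100) s) ≤ t := by
        rw [ceil_le_iff p s t hs]; omega
      omega

lemma whileT_eq_ceilT (p s : Int) (hps : 100 ≤ p + s ∨ 1 ≤ s) :
    whileT (100 - p).toNat p s 1 = ceilT (p, s) := by
  by_cases hdone : 100 ≤ p + s
  · have h1 : ¬ (p + s * 1 < 100) := by omega
    rw [ceilT, if_pos hdone]
    cases h : (100 - p).toNat with
    | zero => rfl
    | succ f => simp only [whileT]; rw [if_neg h1]
  · have hs : 1 ≤ s := hps.resolve_left hdone
    have hfuel : (100 : Int) ≤ p + s * (1 + ((100 - p).toNat : Int)) := by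
      rcases le_or_gt 100 p with h | h
      · have h0 : ((100 - p).toNat : Int) = 0 := by omega
        rw [h0]; nlinarith
      · have h0 : ((100 - p).toNat : Int) = 100 - p := by omega
        rw [h0]; nlinarith
    rw [whileT_spec s hs _ p 1 hfuel]
    have h2 : ¬ (-(PySem.Int.floordiv (p - 100) s) ≤ 1) := by
      rw [ceil_le_iff p s 1 hs]; omega
    rw [ceilT, if_neg hdone]
    show max 1 (-(PySem.Int.floordiv (p - 100) s)) = -(PySem.Int.floordiv (p - 100) s)
    omega

-- A's finish list equals map ceilT over the zip, given equal lengths and positive speeds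
lemma finish_eq_map (progresses speeds : List Int)
    (hlen : progresses.length ≤ speeds.length)
    (hs : ∀ ps ∈ progresses.zip speeds, 100 ≤ ps.1 + ps.2 ∨ 1 ≤ ps.2) :
    (List.range progresses.length).map (fun i =>
      whileT (100 - progresses.getD i 0).toNat (progresses.getD i 0) (speeds.getD i 0) 1)
      = (progresses.zip speeds).map ceilT := by
  apply List.ext_getElem
  · simp; omega
  · intro i h1 h2
    have hip : i < progresses.length := by simpa using h1
    have his : i < speeds.length := by omega
    simp only [List.getElem_map, List.getElem_range, List.getElem_zip]
    rw [List.getD_eq_getElem _ _ hip, List.getD_eq_getElem _ _ his]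
    have hiz : i < (progresses.zip speeds).length := by simp; omega
    have hmem : (progresses[i], speeds[i]) ∈ progresses.zip speeds := by
      rw [← List.getElem_zip (h := hiz)]
      exact List.getElem_mem hiz
    exact whileT_eq_ceilT _ _ (hs _ hmem)

-- grouping: B's fold from a started group (cnt ≥ 1) equals A's deque loop
lemma fold_eq_groupLoop (pairs : List (Int × Int)) :
    ∀ (leader cnt : Int) (answer : List Int), 1 ≤ cnt →
      groupLoop leader (pairs.map ceilT) cnt answer =
        (if (pairs.foldl altStep (leader, cnt, answer)).2.1 ≠ 0 then
          (pairs.foldl altStep (leader, cnt, answer)).2.2 ++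
            [(pairs.foldl altStep (leader, cnt, answer)).2.1]
        else (pairs.foldl altStep (leader, cnt, answer)).2.2) := by
  induction pairs with
  | nil =>
    intro leader cnt answer hc
    simp only [List.foldl_nil, List.map_nil, groupLoop]
    rw [if_pos (by omega)]
  | cons ps rest ih =>
    intro leader cnt answer hc
    simp only [List.map_cons, List.foldl_cons, groupLoop, altStep]
    by_cases hlt : leader < ceilT ps
    · rw [if_pos hlt, if_pos (Or.inr hlt), if_pos (show cnt ≠ 0 by omega)]
      exact ih (ceilT ps) 1 (answer ++ [cnt]) le_rfl
    · rw [if_neg hlt, if_neg (show ¬(cnt = 0 ∨ ceilT ps > leader) from fun h => h.elim (fun h0 => absurd h0 (by omega)) hlt)]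
      exact ih leader (cnt + 1) answer (by omega)

-- ===== VERDICT (by name: the statement is the Claim_ definition above) =====
theorem solution_spec : Claim_equal_solution := by
  intro progresses speeds _ hpre
  obtain ⟨hlen, hne, hs⟩ := hpre
  unfold Spec_solution solution solution_alt
  rw [finish_eq_map progresses speeds hlen hs]
  cases progresses with
  | nil => exact absurd rfl hne
  | cons p0 ptl =>
    cases speeds with
    | nil => simp at hlen
    | cons s0 stl =>
      simp only [List.zip_cons_cons, List.map_cons, List.foldl_cons]
      have h1 : altStep (0, 0, []) (p0, s0) = (ceilT (p0, s0), 1, []) := by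
        simp [altStep]
      rw [h1]
      exact fold_eq_groupLoop (ptl.zip stl) (ceilT (p0, s0)) 1 [] le_rfl
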